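-- pv_equiv track=rewrite | github.com/minaek/reward_design_with_llms | negotiation/ground_truth_rewards.py | stubborn
-- ===== SOURCE A (Python) =====
-- def stubborn(conv, agent_order):
--     assert len(conv) == len(agent_order)
--     alice_utterances = []
--     for i in range(len(conv)):
--         utterance = conv[i][0]
--         if agent_order[i] == "Alice" and "selection" not in utterance:
--             alice_utterances.append(utterance)
--     assert len(alice_utterances) > 0
--
--     # remove copies of the same proposal, count propose and insist the same
--     count = {}
--     dup_alert = False
--     for utt in alice_utterances:
--         utt_list = utt.split(" ")
--         if len(utt_list) > 1:
--             assert "propose" in utt_list[0] or "insist" in utt_list[0]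
--             utt = " ".join(utt_list[1:])
--             if utt in count:  # there is a dup!
--                 dup_alert = True
--             else:
--                 count[utt] = 1
--     if len(alice_utterances) > 1 and dup_alert:
--         return [10, 10]
--     else:
--         return [0, 0]
-- ===== SOURCE B (Python) =====
-- def stubborn(conv, agent_order):
--     assert len(conv) == len(agent_order)
--     n = 0
--     bodies = []
--     for turn, agent in zip(conv, agent_order):
--         utt = turn[0]
--         if agent != "Alice" or "selection" in utt:
--             continue
--         n += 1
--         words = utt.split(" ")
--         if len(words) > 1:
--             assert "propose" in words[0] or "insist" in words[0]
--             bodies.append(" ".join(words[1:]))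
--     assert n > 0
--     srt = sorted(bodies)
--     if n > 1 and any(x == y for x, y in zip(srt, srt[1:])):
--         return [10, 10]
--     return [0, 0]
-- ===== Notes on version B (the rewrite author's own statement) =====
-- stated objective: alternative
-- what changed: B fuses A's two staged passes into one loop over the zipped conversation that keeps only a counter and the proposal bodies (no intermediate alice_utterances list, no dict), and detects duplicates by sorting the bodies and scanning for an equal adjacent pair instead of an incremental dict-membership flag.
import Mathlib
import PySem

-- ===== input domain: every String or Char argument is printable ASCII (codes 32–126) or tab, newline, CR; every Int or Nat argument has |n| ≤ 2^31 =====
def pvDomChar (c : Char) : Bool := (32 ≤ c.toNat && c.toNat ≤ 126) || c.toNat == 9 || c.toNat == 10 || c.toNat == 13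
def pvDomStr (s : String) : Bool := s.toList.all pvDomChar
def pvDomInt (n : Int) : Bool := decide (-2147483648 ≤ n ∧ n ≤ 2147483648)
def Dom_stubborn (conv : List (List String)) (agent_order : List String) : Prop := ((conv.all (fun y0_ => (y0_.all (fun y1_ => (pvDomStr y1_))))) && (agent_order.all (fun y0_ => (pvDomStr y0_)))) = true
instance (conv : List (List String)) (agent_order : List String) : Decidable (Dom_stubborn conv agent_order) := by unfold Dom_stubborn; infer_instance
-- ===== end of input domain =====

-- B fuses A's two staged passes into one loop over the zipped conversation keeping only a
-- counter and the proposal bodies, and detects duplicates by sorting the bodies and scanning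
-- for an equal adjacent pair instead of an incremental dict-membership flag (objective: alternative).


-- ===== PORT A =====
-- second-loop body of A: state = (count dict, dup_alert flag)
def stubbornStep (s : PySem.Dict String Int × Bool) (utt : String) : PySem.Dict String Int × Bool :=
  let utt_list := (PySem.Str.split? utt " ").getD []
  if utt_list.length > 1 then
    -- assert "propose"/"insist": raising inputs are excluded by Pre_
    let utt' := PySem.Str.join " " (PySem.List.slice utt_list (some 1) none)
    if s.1.contains utt' then (s.1, true)
    else (s.1.insert utt' 1, s.2)
  else s

def stubborn (conv : List (List String)) (agent_order : List String) : List Int :=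
  -- assert len(conv) == len(agent_order): raising inputs are excluded by Pre_
  let alice_utterances : List String :=
    (PySem.List.pyRange 0 (conv.length : Int) 1).foldl (fun acc i =>
      let utterance := PySem.List.pyGetD (PySem.List.pyGetD conv i []) 0 ""
      if PySem.List.pyGetD agent_order i "" == "Alice" && !(PySem.Str.isIn "selection" utterance)
      then acc ++ [utterance] else acc) []
  -- assert len(alice_utterances) > 0: raising inputs are excluded by Pre_
  let st := alice_utterances.foldl stubbornStep (PySem.Dict.empty, false)
  if alice_utterances.length > 1 && st.2 then [10, 10] else [0, 0]

-- ===== PORT B =====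
-- Source B's fused loop body: state = (n, bodies); `continue` becomes the first branch
def stubbornAltStep (s : Int × List String) (p : List String × String) : Int × List String :=
  let utt := PySem.List.pyGetD p.1 0 ""   -- turn[0]; empty turns are excluded by Pre_
  if !(p.2 == "Alice") || PySem.Str.isIn "selection" utt then s
  else
    let n := s.1 + 1
    let words := (PySem.Str.split? utt " ").getD []
    -- assert "propose"/"insist": raising inputs are excluded by Pre_
    if words.length > 1 then
      (n, s.2 ++ [PySem.Str.join " " (PySem.List.slice words (some 1) none)])
    else (n, s.2)

def stubborn_alt (conv : List (List String)) (agent_order : List String) : List Int :=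
  -- assert len(conv) == len(agent_order) and assert n > 0: raising inputs are excluded by Pre_
  let st := (conv.zip agent_order).foldl stubbornAltStep ((0 : Int), ([] : List String))
  let srt := PySem.List.sorted st.2 (fun x => x) false
  if st.1 > 1 && (srt.zip (PySem.List.slice srt (some 1) none)).any (fun p => p.1 == p.2)
  then [10, 10] else [0, 0]

-- ===== PRECONDITION & SPEC =====
-- the Alice utterances both programs keep (restates A's/B's shared filter, used to state A's asserts)
def aliceOf (conv : List (List String)) (agent_order : List String) : List String :=
  ((conv.zip agent_order).filter (fun p =>
      p.2 == "Alice" && !(PySem.Str.isIn "selection" (PySem.List.pyGetD p.1 0 "")))).map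
    (fun p => PySem.List.pyGetD p.1 0 "")

-- Pre_ excludes exactly the inputs on which A raises: a length mismatch or an empty turn
-- (IndexError on conv[i][0]) fails an assert / indexing, no Alice utterance fails the second
-- assert, and a multi-token Alice utterance whose first token contains neither "propose" nor
-- "insist" fails the third assert.
def Pre_stubborn (conv : List (List String)) (agent_order : List String) : Prop :=
  conv.length = agent_order.length ∧
  (∀ c ∈ conv, c ≠ []) ∧
  aliceOf conv agent_order ≠ [] ∧
  ∀ u ∈ aliceOf conv agent_order,
    1 < ((PySem.Str.split? u " ").getD []).length →
      (PySem.Str.isIn "propose" (((PySem.Str.split? u " ").getD []).headD "") ||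
       PySem.Str.isIn "insist" (((PySem.Str.split? u " ").getD []).headD "")) = true
instance (conv : List (List String)) (agent_order : List String) : Decidable (Pre_stubborn conv agent_order) := by unfold Pre_stubborn; infer_instance

def pvWitness_stubborn : List (List String) × List String :=
  ([["propose 1 book"], ["ok"]], ["Alice", "Bob"])

def Spec_stubborn (conv : List (List String)) (agent_order : List String) (out : List Int) : Prop := out = stubborn_alt conv agent_order
instance (conv : List (List String)) (agent_order : List String) (out : List Int) : Decidable (Spec_stubborn conv agent_order out) := by unfold Spec_stubborn; infer_instance

-- ===== CLAIM (what is proved, stated in full; the proofs are below) =====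
def Claim_equal_stubborn : Prop := ∀ (conv : List (List String)) (agent_order : List String), Dom_stubborn conv agent_order → Pre_stubborn conv agent_order → Spec_stubborn conv agent_order (stubborn conv agent_order)

-- ===== LEMMAS AND PROOFS =====

-- the body " ".join(utt.split(" ")[1:]) collected by both programs
def bodyOf (utt : String) : String :=
  PySem.Str.join " " (PySem.List.slice ((PySem.Str.split? utt " ").getD []) (some 1) none)

def longUtt (utt : String) : Bool := ((PySem.Str.split? utt " ").getD []).length > 1

def bodiesOf (l : List String) : List String := (l.filter longUtt).map bodyOf

-- stubbornStep, case equations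
theorem step_long_old (s : PySem.Dict String Int × Bool) (utt : String)
    (hl : 1 < ((PySem.Str.split? utt " ").getD []).length)
    (hc : s.1.contains (bodyOf utt) = true) : stubbornStep s utt = (s.1, true) := by
  simp only [stubbornStep, bodyOf] at *
  rw [if_pos hl, if_pos hc]

theorem step_long_new (s : PySem.Dict String Int × Bool) (utt : String)
    (hl : 1 < ((PySem.Str.split? utt " ").getD []).length)
    (hc : s.1.contains (bodyOf utt) = false) :
    stubbornStep s utt = (s.1.insert (bodyOf utt) 1, s.2) := by
  simp only [stubbornStep, bodyOf] at *
  rw [if_pos hl, if_neg (by simp [hc])]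

theorem step_short (s : PySem.Dict String Int × Bool) (utt : String)
    (hl : ¬ 1 < ((PySem.Str.split? utt " ").getD []).length) : stubbornStep s utt = s := by
  simp only [stubbornStep]
  rw [if_neg hl]

-- aliceOf on a cons pair
theorem aliceOf_cons_pos (c : List String) (cs : List (List String)) (a : String)
    (as : List String)
    (hc : (a == "Alice" && !(PySem.Str.isIn "selection" (PySem.List.pyGetD c 0 ""))) = true) :
    aliceOf (c :: cs) (a :: as) = PySem.List.pyGetD c 0 "" :: aliceOf cs as := by
  unfold aliceOf
  rw [List.zip_cons_cons, List.filter_cons]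
  dsimp only
  rw [if_pos hc, List.map_cons]

theorem aliceOf_cons_neg (c : List String) (cs : List (List String)) (a : String)
    (as : List String)
    (hc : ¬ (a == "Alice" && !(PySem.Str.isIn "selection" (PySem.List.pyGetD c 0 ""))) = true) :
    aliceOf (c :: cs) (a :: as) = aliceOf cs as := by
  unfold aliceOf
  rw [List.zip_cons_cons, List.filter_cons]
  dsimp only
  rw [if_neg hc]

-- pure-Nat form of A's first loop vs the shared filter
theorem alice_nat (conv : List (List String)) (ao : List String)
    (h : conv.length = ao.length) :
    ((List.range conv.length).filter (fun k =>
        List.getD ao k "" == "Alice" &&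
          !(PySem.Str.isIn "selection" (PySem.List.pyGetD (List.getD conv k []) 0 "")))).map
      (fun k => PySem.List.pyGetD (List.getD conv k []) 0 "") = aliceOf conv ao := by
  induction conv generalizing ao with
  | nil =>
    cases ao with
    | nil => simp [aliceOf]
    | cons a as => simp at h
  | cons c cs ih =>
    cases ao with
    | nil => simp at h
    | cons a as =>
      simp only [List.length_cons] at h ⊢
      rw [List.range_succ_eq_map, List.filter_cons, List.filter_map]
      simp only [List.getD_cons_zero]
      have htail :
          List.map (fun k => PySem.List.pyGetD ((c :: cs).getD k []) 0 "")
            (List.map Nat.succ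
              (List.filter
                ((fun k => (a :: as).getD k "" == "Alice" &&
                    !PySem.Str.isIn "selection" (PySem.List.pyGetD ((c :: cs).getD k []) 0 "")) ∘
                  Nat.succ)
                (List.range cs.length))) = aliceOf cs as := by
        rw [List.map_map]
        simp only [Function.comp_def, Nat.succ_eq_add_one, List.getD_cons_succ]
        exact ih as (by omega)
      by_cases hc : (a == "Alice" && !(PySem.Str.isIn "selection" (PySem.List.pyGetD c 0 ""))) = true
      · rw [if_pos hc, List.map_cons, htail]
        simp only [List.getD_cons_zero]
        rw [aliceOf_cons_pos c cs a as hc]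
      · rw [if_neg hc, htail, aliceOf_cons_neg c cs a as hc]

-- A's first loop equals the shared filter when the two lists have equal length
theorem alice_core (conv : List (List String)) (ao : List String)
    (h : conv.length = ao.length) :
    ((PySem.List.pyRange 0 (conv.length : Int) 1).filter (fun i =>
        PySem.List.pyGetD ao i "" == "Alice" &&
          !(PySem.Str.isIn "selection" (PySem.List.pyGetD (PySem.List.pyGetD conv i []) 0 "")))).map
      (fun i => PySem.List.pyGetD (PySem.List.pyGetD conv i []) 0 "") = aliceOf conv ao := by
  rw [PySem.List.pyRange_zero_natCast, List.filter_map, List.map_map]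
  simp only [Function.comp_def, PySem.List.pyGetD_natCast]
  exact alice_nat conv ao h

-- A's second loop: the final flag says "the bodies collected (after the dict's keys) repeat"
theorem loopA_flag (l : List String) (d : PySem.Dict String Int) (b : Bool)
    (hd : d.keys.Nodup) :
    (l.foldl stubbornStep (d, b)).2 = (b || !decide (d.keys ++ bodiesOf l).Nodup) := by
  induction l generalizing d b with
  | nil => simp [bodiesOf, hd]
  | cons utt rest ih =>
    simp only [List.foldl_cons]
    by_cases hl : 1 < ((PySem.Str.split? utt " ").getD []).length
    · have hbod : bodiesOf (utt :: rest) = bodyOf utt :: bodiesOf rest := by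
        simp [bodiesOf, longUtt, hl]
      by_cases hc : d.contains (bodyOf utt) = true
      · have hmem : bodyOf utt ∈ d.keys := (PySem.Dict.contains_iff_mem_keys d _).mp hc
        rw [step_long_old (d, b) utt hl hc]
        dsimp only
        rw [ih d true hd]
        have hnd : ¬ (d.keys ++ bodiesOf (utt :: rest)).Nodup := by
          rw [hbod]
          intro hn
          exact (List.nodup_append.mp hn).2.2 (bodyOf utt) hmem (bodyOf utt) (by simp) rfl
        simp [hnd]
      · have hc' : d.contains (bodyOf utt) = false := by simpa using hc
        rw [step_long_new (d, b) utt hl hc']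
        dsimp only
        rw [ih _ b (PySem.Dict.nodup_keys_insert d _ 1 hd),
            PySem.Dict.keys_insert_of_not_contains d 1 hc', hbod, List.append_assoc,
            List.singleton_append]
    · rw [step_short _ _ hl, ih d b hd]
      have : bodiesOf (utt :: rest) = bodiesOf rest := by
        simp [bodiesOf, longUtt, hl]
      rw [this]

-- aliceOf restated over the zipped pair list (for B's fused loop)
def aliceOfP (l : List (List String × String)) : List String :=
  (l.filter (fun p =>
      p.2 == "Alice" && !(PySem.Str.isIn "selection" (PySem.List.pyGetD p.1 0 "")))).map
    (fun p => PySem.List.pyGetD p.1 0 "")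

theorem aliceOf_eq_aliceOfP (conv : List (List String)) (ao : List String) :
    aliceOf conv ao = aliceOfP (conv.zip ao) := rfl

-- B's fused loop = (count of kept Alice utterances, their bodies)
theorem loopB_fused (l : List (List String × String)) (n : Int) (acc : List String) :
    l.foldl stubbornAltStep (n, acc) =
      (n + ((aliceOfP l).length : Int), acc ++ bodiesOf (aliceOfP l)) := by
  induction l generalizing n acc with
  | nil => simp [aliceOfP, bodiesOf]
  | cons p rest ih =>
    simp only [List.foldl_cons]
    by_cases hk : (p.2 == "Alice" && !(PySem.Str.isIn "selection" (PySem.List.pyGetD p.1 0 ""))) = true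
    · have hs : (!(p.2 == "Alice") || PySem.Str.isIn "selection" (PySem.List.pyGetD p.1 0 "")) = false := by
        rw [Bool.and_eq_true] at hk
        obtain ⟨h1, h2⟩ := hk
        rw [h1, Bool.not_true, Bool.false_or]
        cases h : PySem.Str.isIn "selection" (PySem.List.pyGetD p.1 0 "") with
        | false => rfl
        | true => rw [h] at h2; exact absurd h2 (by decide)
      have halice : aliceOfP (p :: rest) = PySem.List.pyGetD p.1 0 "" :: aliceOfP rest := by
        unfold aliceOfP; rw [List.filter_cons, if_pos hk, List.map_cons]
      rw [halice]
      by_cases hl : 1 < ((PySem.Str.split? (PySem.List.pyGetD p.1 0 "") " ").getD []).length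
      · have hstep : stubbornAltStep (n, acc) p =
            (n + 1, acc ++ [bodyOf (PySem.List.pyGetD p.1 0 "")]) := by
          simp only [stubbornAltStep, bodyOf]
          rw [hs, if_neg (by simp), if_pos hl]
        rw [hstep, ih]
        have hbod : bodiesOf (PySem.List.pyGetD p.1 0 "" :: aliceOfP rest) =
            bodyOf (PySem.List.pyGetD p.1 0 "") :: bodiesOf (aliceOfP rest) := by
          simp [bodiesOf, longUtt, hl]
        rw [hbod]
        simp only [List.length_cons, Prod.mk.injEq, List.append_assoc, List.singleton_append]
        exact ⟨by push_cast; ring, trivial⟩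
      · have hstep : stubbornAltStep (n, acc) p = (n + 1, acc) := by
          simp only [stubbornAltStep]
          rw [hs, if_neg (by simp), if_neg hl]
        rw [hstep, ih]
        have hbod : bodiesOf (PySem.List.pyGetD p.1 0 "" :: aliceOfP rest) =
            bodiesOf (aliceOfP rest) := by
          simp [bodiesOf, longUtt, hl]
        rw [hbod]
        simp only [List.length_cons, Prod.mk.injEq]
        exact ⟨by push_cast; ring, trivial⟩
    · have hs : (!(p.2 == "Alice") || PySem.Str.isIn "selection" (PySem.List.pyGetD p.1 0 "")) = true := by
        cases h1 : (p.2 == "Alice") with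
        | false => rfl
        | true =>
          cases h2 : PySem.Str.isIn "selection" (PySem.List.pyGetD p.1 0 "") with
          | true => rfl
          | false => exact absurd (by rw [h1, h2]; rfl) hk
      have halice : aliceOfP (p :: rest) = aliceOfP rest := by
        unfold aliceOfP; rw [List.filter_cons, if_neg hk]
      have hstep : stubbornAltStep (n, acc) p = (n, acc) := by
        simp only [stubbornAltStep]; rw [if_pos hs]
      rw [hstep, ih, halice]

-- in a (≤)-sorted list an equal adjacent pair exists exactly when the list repeats
theorem adj_dup_of_sorted (s : List String) (hs : s.Pairwise (· ≤ ·)) :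
    ((s.zip s.tail).any (fun p => p.1 == p.2)) = !decide s.Nodup := by
  induction s with
  | nil => simp
  | cons a t ih =>
    cases t with
    | nil => simp
    | cons b u =>
      have hpt : (b :: u).Pairwise (· ≤ ·) := hs.tail
      have hab : a ≤ b := (List.pairwise_cons.mp hs).1 b (by simp)
      simp only [List.tail_cons, List.zip_cons_cons, List.any_cons]
      by_cases he : a = b
      · have : ¬ (a :: b :: u).Nodup := by
          intro hn; exact (List.nodup_cons.mp hn).1 (by simp [he])
        simp [he]
      · have hlt : a < b := lt_of_le_of_ne hab he
        have hnotmem : a ∉ b :: u := by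
          intro hm
          rcases List.mem_cons.mp hm with h | h
          · exact he h
          · have : b ≤ a := (List.pairwise_cons.mp hpt).1 a h
            exact absurd (lt_of_lt_of_le hlt this) (lt_irrefl a)
        have hnd : (a :: b :: u).Nodup ↔ (b :: u).Nodup := by
          constructor
          · exact fun h => h.tail
          · exact fun h => List.nodup_cons.mpr ⟨hnotmem, h⟩
        have := ih hpt
        simp only [List.tail_cons] at this
        rw [this]
        by_cases hn : (b :: u).Nodup <;> simp [he, hn, hnd]

-- B's sort-and-scan detects exactly "xs repeats"
theorem sortScan_dup (xs : List String) :
    (((PySem.List.sorted xs (fun x => x) false).zip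
        ((PySem.List.sorted xs (fun x => x) false).tail)).any (fun p => p.1 == p.2)) =
      !decide xs.Nodup := by
  have hperm := PySem.List.sorted_perm xs (fun x => x) false
  have hnd : (PySem.List.sorted xs (fun x => x) false).Nodup ↔ xs.Nodup := hperm.nodup_iff
  rw [adj_dup_of_sorted _ (PySem.List.sorted_pairwise xs (fun x => x))]
  by_cases h : xs.Nodup <;> simp [h, hnd]

-- ===== VERDICT (by name: the statement is the Claim_ definition above) =====
theorem stubborn_spec : Claim_equal_stubborn := by
  intro conv agent_order _ hpre
  obtain ⟨hlen, _, _, _⟩ := hpre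
  show stubborn conv agent_order = stubborn_alt conv agent_order
  unfold stubborn stubborn_alt
  dsimp only
  rw [PySem.List.foldl_append_if, List.nil_append, alice_core conv agent_order hlen,
      loopA_flag (aliceOf conv agent_order) PySem.Dict.empty false PySem.Dict.nodup_keys_empty,
      loopB_fused, PySem.List.slice_from_one, aliceOf_eq_aliceOfP, sortScan_dup]
  simp only [PySem.Dict.keys_empty, List.nil_append, Bool.false_or, List.nil_append]
  have hcast : ((0 : Int) + ((aliceOfP (conv.zip agent_order)).length : Int) > 1) ↔
      ((aliceOfP (conv.zip agent_order)).length > 1) := by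
    constructor <;> intro h <;> [exact_mod_cast (by omega : ((aliceOfP (conv.zip agent_order)).length : Int) > 1); omega]
  by_cases h1 : (aliceOfP (conv.zip agent_order)).length > 1 <;>
    simp [h1]
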